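-- pv_equiv track=rewrite | github.com/mchawla5/Leetcode | DS/350.py | intersectionM2
-- ===== SOURCE A (Python) =====
-- def intersectionM2(nums1, nums2):
--     sortednums1 = sorted(nums1)
--     sortednums2 = sorted(nums2)
--     i = j =0
--     output = []
--     while (i<len(sortednums1) and j<len(sortednums2)):
--         if(sortednums1[i] < sortednums2[j]):
--             i +=1
--         elif(sortednums2[j] < sortednums1[i]):
--             j +=1
--         else:
--             output.append(sortednums1[i])
--             i +=1
--             j +=1
--     return output
-- ===== SOURCE B (Python) =====
-- from collections import Counter
--
-- def intersectionM2(nums1, nums2):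
--     common = Counter(nums1) & Counter(nums2)
--     return sorted(common.elements())
-- ===== Notes on version B (the rewrite author's own statement) =====
-- stated objective: idiomatic
-- what changed: Replaces the sort-both-arrays two-pointer merge with a Counter intersection (hash-table minimum multiplicities) expanded and sorted once.
import Mathlib
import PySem

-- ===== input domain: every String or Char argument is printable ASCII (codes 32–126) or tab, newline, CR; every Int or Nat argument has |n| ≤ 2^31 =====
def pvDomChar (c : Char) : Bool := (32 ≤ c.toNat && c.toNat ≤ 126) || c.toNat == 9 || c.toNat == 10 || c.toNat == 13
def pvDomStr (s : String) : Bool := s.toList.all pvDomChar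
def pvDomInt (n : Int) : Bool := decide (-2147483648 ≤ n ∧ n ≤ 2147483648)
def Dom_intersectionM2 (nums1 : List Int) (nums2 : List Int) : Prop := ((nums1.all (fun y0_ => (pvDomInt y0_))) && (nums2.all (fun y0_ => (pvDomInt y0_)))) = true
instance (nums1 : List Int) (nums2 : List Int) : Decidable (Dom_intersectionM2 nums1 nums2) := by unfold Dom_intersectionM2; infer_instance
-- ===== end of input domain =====

-- B replaces A's sort-both-then-two-pointer merge by a Counter intersection
-- (minimum multiplicities) expanded and sorted once (idiomatic; same results).

-- ===== PORT A =====
-- the while loop of A, with its two indices and the accumulator `output`;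
-- fuel = (remaining i steps) + (remaining j steps), enough for the whole loop
def aWhileLoop (fuel : Nat) (s t : List Int) (i j : Nat) (out : List Int) : List Int :=
  match fuel with
  | 0 => out
  | fuel + 1 =>
    if h : i < s.length ∧ j < t.length then
      if s[i]'h.1 < t[j]'h.2 then aWhileLoop fuel s t (i + 1) j out
      else if t[j]'h.2 < s[i]'h.1 then aWhileLoop fuel s t i (j + 1) out
      else aWhileLoop fuel s t (i + 1) (j + 1) (out ++ [s[i]'h.1])
    else out

def intersectionM2 (nums1 : List Int) (nums2 : List Int) : List Int :=
  let sortednums1 := PySem.List.sorted nums1 (fun x => x) false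
  let sortednums2 := PySem.List.sorted nums2 (fun x => x) false
  aWhileLoop (sortednums1.length + sortednums2.length) sortednums1 sortednums2 0 0 []

-- ===== PORT B =====
-- Counter.__and__: walk self's items, keep min(count, other[elem]) when positive
def bAndItems (items : List (Int × Int)) (c2 : PySem.Dict Int Int) : List (Int × Int) :=
  match items with
  | [] => []
  | (k, v) :: rest =>
    let m := min v (c2.getD k 0)
    if 0 < m then (k, m) :: bAndItems rest c2 else bAndItems rest c2

-- Counter.elements(): each key repeated count times, in key order
def bElements (items : List (Int × Int)) : List Int :=
  match items with
  | [] => []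
  | (k, v) :: rest => List.replicate v.toNat k ++ bElements rest

def intersectionM2_alt (nums1 : List Int) (nums2 : List Int) : List Int :=
  let common := bAndItems (PySem.Dict.counter nums1).items (PySem.Dict.counter (κ := Int) nums2)
  PySem.List.sorted (bElements common) (fun x => x) false

-- ===== PRECONDITION & SPEC =====
def Spec_intersectionM2 (nums1 : List Int) (nums2 : List Int) (out : List Int) : Prop := out = intersectionM2_alt nums1 nums2
instance (nums1 : List Int) (nums2 : List Int) (out : List Int) : Decidable (Spec_intersectionM2 nums1 nums2 out) := by unfold Spec_intersectionM2; infer_instance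

-- ===== CLAIM (what is proved, stated in full; the proofs are below) =====
def Claim_equal_intersectionM2 : Prop := ∀ (nums1 : List Int) (nums2 : List Int), Dom_intersectionM2 nums1 nums2 → Spec_intersectionM2 nums1 nums2 (intersectionM2 nums1 nums2)

-- ===== LEMMAS AND PROOFS =====

-- structural form of A's two-pointer merge (proof device only)
def interMerge : List Int → List Int → List Int
  | [], _ => []
  | _ :: _, [] => []
  | x :: xs, y :: ys =>
    if x < y then interMerge xs (y :: ys)
    else if y < x then interMerge (x :: xs) ys
    else x :: interMerge xs ys

lemma interMerge_nil_left (t : List Int) : interMerge [] t = [] := by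
  cases t <;> simp [interMerge]

lemma interMerge_nil_right (s : List Int) : interMerge s [] = [] := by
  cases s <;> simp [interMerge]

lemma aWhileLoop_eq (fuel : Nat) (s t : List Int) (i j : Nat) (out : List Int)
    (hf : (s.length - i) + (t.length - j) ≤ fuel) :
    aWhileLoop fuel s t i j out = out ++ interMerge (s.drop i) (t.drop j) := by
  induction fuel generalizing i j out with
  | zero =>
    have : s.length ≤ i ∨ t.length ≤ j := by omega
    rcases this with hi | hj
    · rw [aWhileLoop, List.drop_eq_nil_of_le hi, interMerge_nil_left, List.append_nil]
    · rw [aWhileLoop, List.drop_eq_nil_of_le hj, interMerge_nil_right, List.append_nil]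
  | succ fuel ih =>
    rw [aWhileLoop]
    by_cases h : i < s.length ∧ j < t.length
    · rw [dif_pos h, ← List.getElem_cons_drop h.1, ← List.getElem_cons_drop h.2, interMerge]
      by_cases h1 : s[i]'h.1 < t[j]'h.2
      · rw [if_pos h1, if_pos h1, ih (i + 1) j out (by omega), List.getElem_cons_drop]
      · rw [if_neg h1, if_neg h1]
        by_cases h2 : t[j]'h.2 < s[i]'h.1
        · rw [if_pos h2, if_pos h2, ih i (j + 1) out (by omega), List.getElem_cons_drop]
        · rw [if_neg h2, if_neg h2, ih (i + 1) (j + 1) (out ++ [s[i]'h.1]) (by omega)]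
          simp
    · rw [dif_neg h]
      rcases Nat.lt_or_ge i s.length with hi | hi
      · have hj : t.length ≤ j := by omega
        rw [List.drop_eq_nil_of_le hj, interMerge_nil_right, List.append_nil]
      · rw [List.drop_eq_nil_of_le hi, interMerge_nil_left, List.append_nil]

lemma interMerge_sublist_left (s t : List Int) : List.Sublist (interMerge s t) s := by
  fun_induction interMerge s t with
  | case1 t => exact List.nil_sublist _
  | case2 x xs => exact List.nil_sublist _
  | case3 x xs y ys hlt ih => exact ih.cons x
  | case4 x xs y ys hlt hlt2 ih => exact ih
  | case5 x xs y ys hlt hlt2 ih => exact ih.cons₂ x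

lemma count_interMerge (s t : List Int) (hs : s.Pairwise (· ≤ ·)) (ht : t.Pairwise (· ≤ ·))
    (v : Int) : (interMerge s t).count v = min (s.count v) (t.count v) := by
  fun_induction interMerge s t with
  | case1 t => simp
  | case2 x xs => simp
  | case3 x xs y ys hlt ih =>
    rw [ih (List.Pairwise.of_cons hs) ht]
    by_cases hv : x = v
    · subst hv
      have hnm : x ∉ y :: ys := by
        intro hmem
        rcases List.mem_cons.mp hmem with h | h
        · omega
        · have := (List.pairwise_cons.mp ht).1 _ h; omega
      rw [List.count_eq_zero_of_not_mem hnm]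
      simp
    · simp [List.count_cons, hv]
  | case4 x xs y ys hlt hlt2 ih =>
    rw [ih hs (List.Pairwise.of_cons ht)]
    by_cases hv : y = v
    · subst hv
      have hnm : y ∉ x :: xs := by
        intro hmem
        rcases List.mem_cons.mp hmem with h | h
        · omega
        · have := (List.pairwise_cons.mp hs).1 _ h; omega
      rw [List.count_eq_zero_of_not_mem hnm]
      simp
    · simp [List.count_cons, hv]
  | case5 x xs y ys hlt hlt2 ih =>
    have hxy : x = y := by omega
    subst hxy
    rw [List.count_cons, List.count_cons, List.count_cons,
      ih (List.Pairwise.of_cons hs) (List.Pairwise.of_cons ht)]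
    by_cases hv : x = v <;> simp [hv, Nat.succ_min_succ]

lemma count_bElements_and (S : List Int) (hnd : S.Nodup) (g : Int → Int)
    (c2 : PySem.Dict Int Int) (v : Int) :
    (bElements (bAndItems (S.map (fun k => (k, g k))) c2)).count v =
      if v ∈ S then (min (g v) (c2.getD v 0)).toNat else 0 := by
  induction S with
  | nil => simp [bAndItems, bElements]
  | cons k S ih =>
    obtain ⟨hk, hnd'⟩ := List.nodup_cons.mp hnd
    simp only [List.map_cons, bAndItems]
    by_cases hm : 0 < min (g k) (c2.getD k 0)
    · rw [if_pos hm]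
      simp only [bElements, List.count_append, List.count_replicate, ih hnd']
      by_cases hv : v = k
      · subst hv
        simp [hk]
      · have hkv : (k == v) = false := by simp; omega
        simp [List.mem_cons, hv, hkv]
    · rw [if_neg hm, ih hnd']
      by_cases hv : v = k
      · subst hv
        have : (min (g v) (c2.getD v 0)).toNat = 0 := by omega
        simp [hk, this]
      · simp [List.mem_cons, hv]

-- ===== VERDICT (by name: the statement is the Claim_ definition above) =====
theorem intersectionM2_spec : Claim_equal_intersectionM2 := by
  intro nums1 nums2 _hdom
  unfold Spec_intersectionM2 intersectionM2 intersectionM2_alt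
  set s := PySem.List.sorted nums1 (fun x => x) false with hs
  set t := PySem.List.sorted nums2 (fun x => x) false with ht
  have hsp : s.Pairwise (· ≤ ·) := PySem.List.sorted_pairwise nums1 (fun x => x)
  have htp : t.Pairwise (· ≤ ·) := PySem.List.sorted_pairwise nums2 (fun x => x)
  have hA : aWhileLoop (s.length + t.length) s t 0 0 [] = interMerge s t := by
    simpa using aWhileLoop_eq (s.length + t.length) s t 0 0 [] (by omega)
  rw [hA]
  -- B's element list
  have hitems : (PySem.Dict.counter nums1).items
      = (PySem.Set.ofList nums1).map (fun k => (k, (nums1.count k : Int))) :=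
    PySem.Dict.items_counter nums1
  have hcnt : ∀ v : Int,
      (bElements (bAndItems (PySem.Dict.counter nums1).items (PySem.Dict.counter nums2))).count v
        = min (nums1.count v) (nums2.count v) := by
    intro v
    rw [hitems, count_bElements_and _ (PySem.Set.nodup_ofList nums1)]
    by_cases hv : v ∈ nums1
    · rw [if_pos ((PySem.Set.mem_ofList nums1 v).mpr hv), PySem.Dict.getD_counter]
      have : min ((nums1.count v : Int)) ((nums2.count v : Int))
          = ((min (nums1.count v) (nums2.count v) : Nat) : Int) := by
        simp [Nat.cast_min]
      rw [this, Int.toNat_natCast]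
    · rw [if_neg (by simpa [PySem.Set.mem_ofList] using hv)]
      rw [List.count_eq_zero_of_not_mem hv]
      simp
  have hcount : ∀ v : Int, (interMerge s t).count v
      = (bElements (bAndItems (PySem.Dict.counter nums1).items (PySem.Dict.counter nums2))).count v := by
    intro v
    rw [count_interMerge s t hsp htp, hcnt v,
      (PySem.List.sorted_perm nums1 (fun x => x) false).count_eq,
      (PySem.List.sorted_perm nums2 (fun x => x) false).count_eq]
  have hperm : (interMerge s t).Perm
      (bElements (bAndItems (PySem.Dict.counter nums1).items (PySem.Dict.counter nums2))) :=
    List.perm_iff_count.mpr hcount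
  have hpair : (interMerge s t).Pairwise (· ≤ ·) :=
    hsp.sublist (interMerge_sublist_left s t)
  exact (PySem.List.sorted_id_eq_of_perm_of_pairwise _ _ hperm hpair).symm
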